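-- pv_equiv track=rewrite | github.com/aarnold5/advent-of-code-2024 | day22/day22_puzzle1.py | generate_secret_number
-- ===== SOURCE A (Python) =====
-- def mix(given_value, secret_number):
--     secret_number = given_value ^ secret_number
--     return secret_number
--
-- def prune(secret_number):
--     secret_number = secret_number % 16777216
--     return secret_number
--
-- def generate_secret_number(secret_num, depth, max_depth):
--     if depth == max_depth:
--         return secret_num
--
--     else:
--         res = secret_num * 64
--         secret_num = mix(res, secret_num)
--         secret_num = prune(secret_num)
--
--         res = secret_num // 32
--         secret_num = mix(res, secret_num)
--         secret_num = prune(secret_num)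
--
--         res = secret_num * 2048
--         secret_num = mix(res, secret_num)
--         secret_num = prune(secret_num)
--
--         return generate_secret_number(secret_num, depth+1, max_depth)
-- ===== SOURCE B (Python) =====
-- def generate_secret_number(secret_num, depth, max_depth):
--     for _ in range(max_depth - depth):
--         secret_num = ((secret_num * 64) ^ secret_num) % 16777216
--         secret_num = ((secret_num // 32) ^ secret_num) % 16777216
--         secret_num = ((secret_num * 2048) ^ secret_num) % 16777216
--     return secret_num
-- ===== Notes on version B (the rewrite author's own statement) =====
-- stated objective: simpler
-- what changed: Replaces A's self-recursion with mix/prune helper calls by a flat for-loop over range(max_depth - depth) with the three transform steps inlined.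
import Mathlib
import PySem

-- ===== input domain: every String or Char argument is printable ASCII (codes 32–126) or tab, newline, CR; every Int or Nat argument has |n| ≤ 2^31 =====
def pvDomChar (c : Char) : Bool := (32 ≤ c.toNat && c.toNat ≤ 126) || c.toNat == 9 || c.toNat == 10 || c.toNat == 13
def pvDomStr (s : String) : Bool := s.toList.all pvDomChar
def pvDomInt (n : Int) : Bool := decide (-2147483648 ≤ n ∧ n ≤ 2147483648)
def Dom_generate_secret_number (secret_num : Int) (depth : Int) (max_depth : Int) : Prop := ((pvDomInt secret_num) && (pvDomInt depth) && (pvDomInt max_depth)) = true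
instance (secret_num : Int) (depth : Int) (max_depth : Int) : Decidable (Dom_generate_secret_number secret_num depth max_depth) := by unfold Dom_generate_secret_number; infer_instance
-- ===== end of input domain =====

-- B replaces A's self-recursion (with mix/prune helpers) by a flat fold over range(max_depth - depth)
-- with the three transform steps inlined: same values, simpler decomposition (return value only).


-- ===== PORT A =====
def pv_mix (given_value : Int) (secret_number : Int) : Int :=
  PySem.Int.bxor given_value secret_number

def pv_prune (secret_number : Int) : Int :=
  PySem.Int.mod secret_number 16777216

def generate_secret_number (secret_num : Int) (depth : Int) (max_depth : Int) : Int :=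
  if depth = max_depth then secret_num
  else if max_depth ≤ depth then secret_num
    -- totality guard only: Python recurses forever here (RecursionError); excluded by Pre_
  else
    let s1 := pv_prune (pv_mix (secret_num * 64) secret_num)
    let s2 := pv_prune (pv_mix (PySem.Int.floordiv s1 32) s1)
    let s3 := pv_prune (pv_mix (s2 * 2048) s2)
    generate_secret_number s3 (depth + 1) max_depth
termination_by (max_depth - depth).toNat
decreasing_by omega

-- ===== PORT B =====
def generate_secret_number_alt (secret_num : Int) (depth : Int) (max_depth : Int) : Int :=
  (PySem.List.pyRange 0 (max_depth - depth) 1).foldl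
    (fun s _ =>
      let a := PySem.Int.mod (PySem.Int.bxor (s * 64) s) 16777216
      let b := PySem.Int.mod (PySem.Int.bxor (PySem.Int.floordiv a 32) a) 16777216
      PySem.Int.mod (PySem.Int.bxor (b * 2048) b) 16777216)
    secret_num

-- ===== PRECONDITION & SPEC =====
-- Pre_ excludes only depth > max_depth: there A recurses forever (RecursionError),
-- never returning a value.
def Pre_generate_secret_number (secret_num : Int) (depth : Int) (max_depth : Int) : Prop :=
  depth ≤ max_depth
instance (secret_num : Int) (depth : Int) (max_depth : Int) : Decidable (Pre_generate_secret_number secret_num depth max_depth) := by unfold Pre_generate_secret_number; infer_instance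

def pvWitness_generate_secret_number : Int × Int × Int := (123, 0, 10)

def Spec_generate_secret_number (secret_num : Int) (depth : Int) (max_depth : Int) (out : Int) : Prop := out = generate_secret_number_alt secret_num depth max_depth
instance (secret_num : Int) (depth : Int) (max_depth : Int) (out : Int) : Decidable (Spec_generate_secret_number secret_num depth max_depth out) := by unfold Spec_generate_secret_number; infer_instance

-- ===== CLAIM (what is proved, stated in full; the proofs are below) =====
def Claim_equal_generate_secret_number : Prop := ∀ (secret_num : Int) (depth : Int) (max_depth : Int), Dom_generate_secret_number secret_num depth max_depth → Pre_generate_secret_number secret_num depth max_depth → Spec_generate_secret_number secret_num depth max_depth (generate_secret_number secret_num depth max_depth)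

-- ===== LEMMAS AND PROOFS =====

-- B's one-round body, named for the proofs only
def pv_step (s : Int) : Int :=
  let a := PySem.Int.mod (PySem.Int.bxor (s * 64) s) 16777216
  let b := PySem.Int.mod (PySem.Int.bxor (PySem.Int.floordiv a 32) a) 16777216
  PySem.Int.mod (PySem.Int.bxor (b * 2048) b) 16777216

theorem pyRange_empty (a : Int) : PySem.List.pyRange a a 1 = [] := by
  simp [PySem.List.pyRange]

-- folding B's body over pyRange a b 1 depends only on b - a
theorem foldl_step_shift (n : Nat) : ∀ (a b s : Int), b - a = n →
    (PySem.List.pyRange a b 1).foldl (fun s _ => pv_step s) s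
      = (PySem.List.pyRange 0 (n : Int) 1).foldl (fun s _ => pv_step s) s := by
  induction n with
  | zero =>
    intro a b s h
    have hba : b = a := by omega
    subst hba
    rw [pyRange_empty]
    norm_num [pyRange_empty]
  | succ k ih =>
    intro a b s h
    have ha : a < b := by omega
    have h0 : (0 : Int) < ((k + 1 : Nat) : Int) := by omega
    rw [PySem.List.pyRange_one_cons ha, PySem.List.pyRange_one_cons h0]
    simp only [List.foldl_cons]
    rw [ih (a + 1) b (pv_step s) (by omega),
        ih (0 + 1) ((k + 1 : Nat) : Int) (pv_step s) (by omega)]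

-- B advances by one round when there is at least one round to do
theorem alt_succ (s d m : Int) (h : d < m) :
    generate_secret_number_alt s d m
      = generate_secret_number_alt (pv_step s) (d + 1) m := by
  show (PySem.List.pyRange 0 (m - d) 1).foldl (fun s _ => pv_step s) s
      = (PySem.List.pyRange 0 (m - (d + 1)) 1).foldl (fun s _ => pv_step s) (pv_step s)
  rw [PySem.List.pyRange_one_cons (by omega : (0 : Int) < m - d)]
  simp only [List.foldl_cons]
  rw [foldl_step_shift (m - (d + 1)).toNat (0 + 1) (m - d) (pv_step s) (by omega),
      foldl_step_shift (m - (d + 1)).toNat 0 (m - (d + 1)) (pv_step s) (by omega)]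

theorem gen_eq_alt (n : Nat) : ∀ (s d m : Int), (m - d).toNat = n → d ≤ m →
    generate_secret_number s d m = generate_secret_number_alt s d m := by
  induction n with
  | zero =>
    intro s d m hn hdm
    have : d = m := by omega
    subst this
    rw [generate_secret_number, generate_secret_number_alt]
    simp
  | succ k ih =>
    intro s d m hn hdm
    have hdm' : d < m := by omega
    rw [generate_secret_number, if_neg (by omega), if_neg (by omega)]
    rw [ih _ (d + 1) m (by omega) (by omega)]
    exact (alt_succ s d m hdm').symm

-- ===== VERDICT (by name: the statement is the Claim_ definition above) =====
theorem generate_secret_number_spec : Claim_equal_generate_secret_number := by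
  intro s d m _ hpre
  unfold Spec_generate_secret_number
  exact gen_eq_alt (m - d).toNat s d m rfl hpre
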